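-- pv_equiv track=rewrite | github.com/kckagancan/CMPE-150 | Image Processing Project/Main.py | sort_rows_border
-- ===== SOURCE A (Python) =====
-- def sort_rows_border(img_matrix):
--
--     for i in range(len(img_matrix)):
--         img_matrix[i].append(0)
--         temp = []
--         col_num = 0
--         for j in range(len(img_matrix[i])):
--
--             if img_matrix[i][j] == 0:
--
--                 temp.sort()
--                 for num in temp:
--                     img_matrix[i][col_num] = num
--                     col_num += 1
--
--                 col_num = j+1
--                 temp = []
--
--             else:
--                 temp.append(img_matrix[i][j])
--
--         img_matrix[i].pop()
--
--     return img_matrix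
-- ===== SOURCE B (Python) =====
-- def sort_rows_border(img_matrix):
--     # Rebuild each row by splitting it into zero cells and maximal non-zero
--     # runs, sorting each run, and concatenating; written back in place.
--     for row in img_matrix:
--         new = []
--         i = 0
--         n = len(row)
--         while i < n:
--             if row[i] == 0:
--                 new.append(0)
--                 i += 1
--             else:
--                 j = i
--                 while j < n and row[j] != 0:
--                     j += 1
--                 new.extend(sorted(row[i:j]))
--                 i = j
--         row[:] = new
--     return img_matrix
-- ===== Notes on version B (the rewrite author's own statement) =====
-- stated objective: simpler
-- what changed: B rebuilds each row as a fresh list by scanning zero-delimited runs with two pointers and concatenating sorted runs, instead of A's sentinel-append, in-place indexed writes and manual col_num threading.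
import Mathlib
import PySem

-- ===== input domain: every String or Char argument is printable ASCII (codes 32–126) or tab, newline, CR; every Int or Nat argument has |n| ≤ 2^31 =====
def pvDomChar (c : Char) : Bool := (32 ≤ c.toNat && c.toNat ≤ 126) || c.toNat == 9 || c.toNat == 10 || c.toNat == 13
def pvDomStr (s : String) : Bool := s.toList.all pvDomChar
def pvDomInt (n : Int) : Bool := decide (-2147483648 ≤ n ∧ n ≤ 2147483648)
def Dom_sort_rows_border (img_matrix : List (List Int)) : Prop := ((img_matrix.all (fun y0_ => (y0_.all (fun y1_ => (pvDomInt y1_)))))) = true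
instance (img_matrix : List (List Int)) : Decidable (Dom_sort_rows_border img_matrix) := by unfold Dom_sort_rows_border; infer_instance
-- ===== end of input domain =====

-- B rebuilds each row from sorted zero-delimited runs instead of A's sentinel
-- append + in-place indexed writes; objective: simpler. Python A and B both
-- mutate the rows in place; the equivalence proved here is about the return value.

-- ===== PORT A =====
-- one row of A: append sentinel 0, scan indices, write back sorted temp at
-- col_num on each zero, pop the sentinel. Loop indices j and col_num are the
-- values of range(len(row)+1), always non-negative and in range, so they are
-- carried as Nat; reads img_matrix[i][j] (always in range) are List.getD.
def pvRowA (row : List Int) : List Int :=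
  (((List.range (row ++ [(0 : Int)]).length).foldl
    (fun (s : List Int × List Int × Nat) j =>
      if s.1.getD j 0 = 0 then
        let t := PySem.List.sorted s.2.1 (fun x => x) false
        ((t.foldl (fun (p : List Int × Nat) num => (p.1.set p.2 num, p.2 + 1)) (s.1, s.2.2)).1,
         [], j + 1)
      else (s.1, s.2.1 ++ [s.1.getD j 0], s.2.2))
    (row ++ [(0 : Int)], [], 0)).1).dropLast

def sort_rows_border (img_matrix : List (List Int)) : List (List Int) :=
  img_matrix.map pvRowA

-- ===== PORT B =====
-- one row of B: zero cells pass through; a maximal non-zero run (the inner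
-- while scan = takeWhile/dropWhile on (· ≠ 0)) is replaced by its sorted copy.
def pvRowB : List Int → List Int
  | [] => []
  | x :: rest =>
    if x = 0 then 0 :: pvRowB rest
    else PySem.List.sorted (x :: rest.takeWhile (· ≠ 0)) (fun y => y) false
           ++ pvRowB (rest.dropWhile (· ≠ 0))
termination_by l => l.length
decreasing_by
  · simp
  · exact Nat.lt_succ_of_le (List.length_dropWhile_le _ _)

def sort_rows_border_alt (img_matrix : List (List Int)) : List (List Int) :=
  img_matrix.map pvRowB

-- ===== PRECONDITION & SPEC =====
def Spec_sort_rows_border (img_matrix : List (List Int)) (out : List (List Int)) : Prop := out = sort_rows_border_alt img_matrix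
instance (img_matrix : List (List Int)) (out : List (List Int)) : Decidable (Spec_sort_rows_border img_matrix out) := by unfold Spec_sort_rows_border; infer_instance

-- ===== CLAIM (what is proved, stated in full; the proofs are below) =====
def Claim_equal_sort_rows_border : Prop := ∀ (img_matrix : List (List Int)), Dom_sort_rows_border img_matrix → Spec_sort_rows_border img_matrix (sort_rows_border img_matrix)

-- ===== LEMMAS AND PROOFS =====

-- the remaining processing of A's inner loop, abstracted over the unread suffix s
def pvRunAux : List Int → List Int → List Int
  | temp, [] => temp
  | temp, a :: s' =>
    if a = 0 then
      PySem.List.sorted temp (fun x => x) false ++ 0 :: pvRunAux [] s'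
    else pvRunAux (temp ++ [a]) s'

theorem pvRowB_eq_split (s : List Int) :
    pvRowB s =
      PySem.List.sorted (s.takeWhile (· ≠ 0)) (fun y => y) false
        ++ pvRowB (s.dropWhile (· ≠ 0)) := by
  match s with
  | [] => simp [pvRowB, PySem.List.sorted_eq_nil_iff]
  | x :: rest =>
    by_cases hx : x = 0
    · subst hx
      simp [pvRowB, List.takeWhile, List.dropWhile, PySem.List.sorted_eq_nil_iff]
    · rw [pvRowB]
      simp [hx]

theorem pvRunAux_spec (s : List Int) : ∀ temp,
    pvRunAux temp (s ++ [0]) =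
      PySem.List.sorted (temp ++ s.takeWhile (· ≠ 0)) (fun y => y) false
        ++ pvRowB (s.dropWhile (· ≠ 0)) ++ [0] := by
  induction s with
  | nil =>
    intro temp
    simp [pvRunAux, pvRowB]
  | cons a s' ih =>
    intro temp
    by_cases ha : a = 0
    · subst ha
      rw [List.cons_append, pvRunAux]
      rw [ih []]
      have hB : pvRowB (0 :: s') = 0 :: pvRowB s' := by simp [pvRowB]
      rw [show List.takeWhile (fun x => decide (x ≠ 0)) ((0:Int) :: s') = [] by simp,
          show List.dropWhile (fun x => decide (x ≠ 0)) ((0:Int) :: s') = (0:Int) :: s' by simp,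
          List.append_nil, hB, pvRowB_eq_split s']
      simp
    · rw [List.cons_append, pvRunAux]
      simp only [if_neg ha]
      rw [ih (temp ++ [a])]
      simp [ha, List.append_assoc]

-- writing a list t over a segment of equal length |old| at position |P|
theorem pvWrite_eq (t : List Int) : ∀ (P old rest : List Int), old.length = t.length →
    (t.foldl (fun (p : List Int × Nat) num => (p.1.set p.2 num, p.2 + 1))
        (P ++ old ++ rest, P.length)).1 = P ++ t ++ rest := by
  induction t with
  | nil =>
    intro P old rest h
    simp at h; simp [h]
  | cons n t' ih =>
    intro P old rest h
    match old with
    | [] => simp at h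
    | o :: old' =>
      simp only [List.foldl_cons]
      have hset : (P ++ (o :: old') ++ rest).set P.length n = (P ++ [n]) ++ old' ++ rest := by
        rw [List.append_assoc, List.set_append_right _ _ (le_refl _)]
        simp
      rw [hset]
      have h2 := ih (P ++ [n]) old' rest (Nat.succ_injective (by simpa using h))
      simpa using h2

-- the loop invariant for A's inner scan
theorem pvLoop_inv (s : List Int) : ∀ (P temp r : List Int) (c k : Nat),
    r = P ++ temp ++ s → c = P.length → k = P.length + temp.length →
    ((List.range' k s.length).foldl
      (fun (st : List Int × List Int × Nat) j =>
        if st.1.getD j 0 = 0 then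
          let t := PySem.List.sorted st.2.1 (fun x => x) false
          ((t.foldl (fun (p : List Int × Nat) num => (p.1.set p.2 num, p.2 + 1)) (st.1, st.2.2)).1,
           [], j + 1)
        else (st.1, st.2.1 ++ [st.1.getD j 0], st.2.2))
      (r, temp, c)).1 = P ++ pvRunAux temp s := by
  induction s with
  | nil =>
    intro P temp r c k hr hc hk
    simp [pvRunAux, hr]
  | cons a s' ih =>
    intro P temp r c k hr hc hk
    subst hr hc hk
    rw [List.length_cons, List.range'_succ, List.foldl_cons]
    have hread : (P ++ temp ++ (a :: s')).getD (P.length + temp.length) 0 = a := by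
      have h2 : P.length + temp.length = (P ++ temp).length := by simp
      rw [h2]
      simp [List.getD_eq_getElem?_getD]
    simp only [hread]
    by_cases ha : a = 0
    · subst ha
      rw [if_pos rfl]
      have hw := pvWrite_eq (PySem.List.sorted temp (fun x => x) false) P temp ((0:Int) :: s')
        (by simp [PySem.List.length_sorted])
      simp only [hw]
      rw [ih (P ++ PySem.List.sorted temp (fun x => x) false ++ [0]) [] _ _ _
            (by simp) (by simp [PySem.List.length_sorted]; try omega)
            (by simp [PySem.List.length_sorted]; try omega)]
      simp [pvRunAux]
    · rw [if_neg ha]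
      rw [ih P (temp ++ [a]) _ _ _ (by simp) rfl (by simp; omega)]
      simp [pvRunAux, ha]

theorem pvRowA_eq_pvRowB (row : List Int) : pvRowA row = pvRowB row := by
  unfold pvRowA
  rw [List.range_eq_range']
  rw [pvLoop_inv (row ++ [(0:Int)]) [] [] _ _ _ (by simp) (by simp) (by simp)]
  rw [pvRunAux_spec row []]
  have hdl : ∀ (X : List Int), (X ++ [(0:Int)]).dropLast = X := fun X => by simp
  rw [List.nil_append, List.append_assoc, ← List.append_assoc, hdl]
  simp only [List.nil_append]
  rw [← pvRowB_eq_split]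

-- ===== VERDICT (by name: the statement is the Claim_ definition above) =====
theorem sort_rows_border_spec : Claim_equal_sort_rows_border := by
  intro img _
  unfold Spec_sort_rows_border sort_rows_border sort_rows_border_alt
  exact List.map_congr_left (fun row _ => pvRowA_eq_pvRowB row)
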